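-- pv_equiv track=rewrite | github.com/miikue/JCU-PRG-Learn | Python/wordvalue.py | worthOfList
-- ===== SOURCE A (Python) =====
-- dict = {1:['e','a','o','n','r','t','l','s','u'],
--         2:['d','g'],
--         3: ['b','c','m','p'],
--         4: ['f','h','v','w','y'],
--         5: ['k'],
--         8: ['j','x'],
--         10: ['q','z']}
--
-- def calculate_score(word):
--     score = 0
--     for i in word:
--         for key, value in dict.items():
--             if i in value:
--                 score += key
--     return score
--
-- def worthOfList(list):
--     # Create dictionary with words and their scores
--     words_dict = {}
--     for i in list:
--         words_dict[i] = calculate_score(i)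
--
--     # Find max value
--     max = 0
--     for key, value in words_dict.items():
--         if value > max:
--             max = value
--
--     # Find all words with max value
--     result = []
--     for key, value in words_dict.items():
--         if value == max:
--             result.append(key)
--     return result
-- ===== SOURCE B (Python) =====
-- LETTER_SCORES = {'e': 1, 'a': 1, 'o': 1, 'n': 1, 'r': 1, 't': 1, 'l': 1, 's': 1, 'u': 1,
--                  'd': 2, 'g': 2,
--                  'b': 3, 'c': 3, 'm': 3, 'p': 3,
--                  'f': 4, 'h': 4, 'v': 4, 'w': 4, 'y': 4,
--                  'k': 5, 'j': 8, 'x': 8, 'q': 10, 'z': 10}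
--
-- def worthOfList(list):
--     best = 0
--     result = []
--     seen = set()
--     for w in list:
--         if w in seen:
--             continue
--         seen.add(w)
--         s = sum(LETTER_SCORES.get(c, 0) for c in w)
--         if s > best:
--             best = s
--             result = [w]
--         elif s == best:
--             result.append(w)
--     return result
-- ===== Notes on version B (the rewrite author's own statement) =====
-- stated objective: faster
-- what changed: Replaces the per-character scan over the 7-group score-to-letters dict with a flat letter-to-score table lookup, and fuses A's three passes (build word-score dict, find max, collect max) into a single pass that skips already-seen words and maintains a running best score and result list.
import Mathlib
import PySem

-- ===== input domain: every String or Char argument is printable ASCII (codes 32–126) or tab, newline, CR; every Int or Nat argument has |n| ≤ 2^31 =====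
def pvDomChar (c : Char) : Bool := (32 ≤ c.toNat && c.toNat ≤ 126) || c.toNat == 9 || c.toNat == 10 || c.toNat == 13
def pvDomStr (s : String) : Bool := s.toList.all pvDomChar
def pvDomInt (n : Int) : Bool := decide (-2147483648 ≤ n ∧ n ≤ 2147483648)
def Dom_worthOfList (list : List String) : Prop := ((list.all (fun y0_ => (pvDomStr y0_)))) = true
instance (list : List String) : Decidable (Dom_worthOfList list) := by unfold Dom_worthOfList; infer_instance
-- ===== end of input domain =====

-- B replaces A's three passes (build word→score dict, find max, collect) by one pass with a
-- running best/result and a seen-set, and scores via a flat letter→score table (alternative decomposition).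


-- ===== PORT A =====
-- the module-level 'dict' constant (values are one-character strings; ported as Chars)
def scoreTable : List (Int × List Char) :=
  [(1, ['e','a','o','n','r','t','l','s','u']),
   (2, ['d','g']),
   (3, ['b','c','m','p']),
   (4, ['f','h','v','w','y']),
   (5, ['k']),
   (8, ['j','x']),
   (10, ['q','z'])]

def calculate_score (word : String) : Int :=
  word.toList.foldl (fun score i =>
    scoreTable.foldl (fun score kv => if i ∈ kv.2 then score + kv.1 else score) score) 0

def worthOfList (list : List String) : List String :=
  let wordsDict : PySem.Dict String Int :=
    list.foldl (fun d i => d.insert i (calculate_score i)) PySem.Dict.empty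
  let mx : Int :=
    wordsDict.items.foldl (fun m kv => if kv.2 > m then kv.2 else m) 0
  wordsDict.items.foldl (fun r kv => if kv.2 = mx then r ++ [kv.1] else r) []

-- ===== PORT B =====
-- the LETTER_SCORES constant of Source B
def letterScores : PySem.Dict Char Int :=
  PySem.Dict.mk
    [('e',1),('a',1),('o',1),('n',1),('r',1),('t',1),('l',1),('s',1),('u',1),
     ('d',2),('g',2),('b',3),('c',3),('m',3),('p',3),
     ('f',4),('h',4),('v',4),('w',4),('y',4),('k',5),('j',8),('x',8),('q',10),('z',10)]

def scoreB (w : String) : Int := (w.toList.map (fun c => letterScores.getD c 0)).sum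

-- the loop body of Source B's single pass (state: (seen, (best, result)))
def stepB (st : PySem.Set String × Int × List String) (w : String) :
    PySem.Set String × Int × List String :=
  if PySem.Set.contains st.1 w then st
  else
    let s := scoreB w
    (PySem.Set.add st.1 w,
     if s > st.2.1 then (s, [w])
     else if s = st.2.1 then (st.2.1, st.2.2 ++ [w])
     else st.2)

def worthOfList_alt (list : List String) : List String :=
  (list.foldl stepB
    (((PySem.Set.empty : PySem.Set String), ((0 : Int), ([] : List String))))).2.2

-- ===== PRECONDITION & SPEC =====
def Spec_worthOfList (list : List String) (out : List String) : Prop := out = worthOfList_alt list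
instance (list : List String) (out : List String) : Decidable (Spec_worthOfList list out) := by unfold Spec_worthOfList; infer_instance

-- ===== CLAIM (what is proved, stated in full; the proofs are below) =====
def Claim_equal_worthOfList : Prop := ∀ (list : List String), Dom_worthOfList list → Spec_worthOfList list (worthOfList list)

-- ===== LEMMAS AND PROOFS =====

-- per-character: A's scan over the grouped table adds exactly B's flat-table score
lemma char_score_eq (c : Char) :
    scoreTable.foldl (fun score kv => if c ∈ kv.2 then score + kv.1 else score) 0
      = letterScores.getD c 0 := by
  by_cases h : c ∈ ['e','a','o','n','r','t','l','s','u','d','g','b','c','m','p','f','h','v','w','y','k','j','x','q','z']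
  · fin_cases h <;> decide
  · simp only [List.mem_cons, List.not_mem_nil, or_false, not_or] at h
    obtain ⟨h1,h2,h3,h4,h5,h6,h7,h8,h9,h10,h11,h12,h13,h14,h15,h16,h17,h18,h19,h20,h21,h22,h23,h24,h25⟩ := h
    simp [scoreTable, letterScores, PySem.Dict.getD_eq_get?_getD, PySem.Dict.get?,
      h1,h2,h3,h4,h5,h6,h7,h8,h9,h10,h11,h12,h13,h14,h15,h16,h17,h18,h19,h20,h21,h22,h23,h24,h25,
      Ne.symm]

lemma step_eq_add (c : Char) :
    (fun (score : Int) (kv : Int × List Char) => if c ∈ kv.2 then score + kv.1 else score)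
      = fun score kv => score + (if c ∈ kv.2 then kv.1 else 0) := by
  funext s kv; split_ifs <;> ring

lemma inner_shift (c : Char) (s : Int) :
    scoreTable.foldl (fun score kv => if c ∈ kv.2 then score + kv.1 else score) s
      = s + scoreTable.foldl (fun score kv => if c ∈ kv.2 then score + kv.1 else score) 0 := by
  rw [step_eq_add, PySem.List.foldl_add, PySem.List.foldl_add]; ring

lemma score_eq (w : String) : calculate_score w = scoreB w := by
  unfold calculate_score scoreB
  have h : (fun (score : Int) (i : Char) =>
      scoreTable.foldl (fun score kv => if i ∈ kv.2 then score + kv.1 else score) score)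
      = fun score i => score + letterScores.getD i 0 := by
    funext s c
    rw [inner_shift, char_score_eq]
  rw [h, PySem.List.foldl_add]
  simp

-- ---- A side: the word dict is (set of words) paired with their scores ----

lemma dict_getD (l : List String) (d : PySem.Dict String Int)
    (h : ∀ k ∈ d.keys, d.getD k 0 = calculate_score k) :
    ∀ k ∈ (l.foldl (fun d i => d.insert i (calculate_score i)) d).keys,
      (l.foldl (fun d i => d.insert i (calculate_score i)) d).getD k 0 = calculate_score k := by
  induction l generalizing d with
  | nil => simpa using h
  | cons x l ih =>
    intro k hk
    refine ih (d.insert x (calculate_score x)) ?_ k hk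
    intro k' hk'
    rw [PySem.Dict.getD_insert]
    rcases (PySem.Dict.mem_keys_insert _ _ _ _).mp hk' with h' | h'
    · simp [h']
    · split_ifs with he
      · simp [he]
      · exact h k' h'

lemma items_A (l : List String) :
    (l.foldl (fun d i => d.insert i (calculate_score i)) PySem.Dict.empty).items
      = (PySem.Set.ofList l).map (fun w => (w, calculate_score w)) := by
  set d := l.foldl (fun d i => d.insert i (calculate_score i)) PySem.Dict.empty with hd
  have hkeys : d.keys = PySem.Set.ofList l := by
    rw [hd, PySem.Dict.keys_foldl_insert]
    simp [PySem.Dict.keys_empty, PySem.Set.update_nil_left]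
  have hnd : d.keys.Nodup := by
    rw [hd]; exact PySem.Dict.nodup_keys_foldl_insert _ _ _ (by simp)
  rw [PySem.Dict.items_eq_map_keys d hnd 0, hkeys]
  refine List.map_congr_left ?_
  intro w hw
  have := dict_getD l PySem.Dict.empty (by simp [PySem.Dict.keys_empty]) w
    (by rw [hkeys]; exact hw)
  rw [this]

-- ---- the one-pass argmax-collect on a list of (word, score) pairs ----

def stepP (br : Int × List String) (kv : String × Int) : Int × List String :=
  if kv.2 > br.1 then (kv.2, [kv.1])
  else if kv.2 = br.1 then (br.1, br.2 ++ [kv.1])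
  else br

def Mx (ps : List (String × Int)) (b : Int) : Int :=
  ps.foldl (fun m kv => if kv.2 > m then kv.2 else m) b

lemma le_Mx (ps : List (String × Int)) (b : Int) : b ≤ Mx ps b := by
  induction ps generalizing b with
  | nil => simp [Mx]
  | cons kv ps ih =>
    simp only [Mx, List.foldl_cons]
    split_ifs with h
    · exact le_of_lt (lt_of_lt_of_le h (ih kv.2))
    · exact ih b

lemma onepass (ps : List (String × Int)) (b : Int) (r : List String) :
    ps.foldl stepP (b, r)
      = (Mx ps b, (if b = Mx ps b then r else [])
          ++ (ps.filter (fun kv => kv.2 = Mx ps b)).map (·.1)) := by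
  induction ps generalizing b r with
  | nil => simp [Mx]
  | cons kv ps ih =>
    have hMx : Mx (kv :: ps) b = if kv.2 > b then Mx ps kv.2 else Mx ps b := by
      simp only [Mx, List.foldl_cons]; split_ifs <;> rfl
    simp only [List.foldl_cons]
    by_cases h1 : kv.2 > b
    · have hgt : b < Mx ps kv.2 := lt_of_lt_of_le h1 (le_Mx ps kv.2)
      rw [show stepP (b, r) kv = (kv.2, [kv.1]) by simp [stepP, h1], ih, hMx, if_pos h1,
        if_neg (show ¬ b = Mx ps kv.2 by omega)]
      by_cases h2 : kv.2 = Mx ps kv.2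
      · rw [if_pos h2, List.filter_cons_of_pos (by simpa using h2)]
        simp
      · rw [if_neg h2, List.filter_cons_of_neg (by simpa using h2)]
    · by_cases h2 : kv.2 = b
      · rw [show stepP (b, r) kv = (b, r ++ [kv.1]) by simp [stepP, h2], ih, hMx, if_neg h1]
        by_cases h3 : b = Mx ps b
        · rw [if_pos h3, if_pos h3, List.filter_cons_of_pos (by simp [h2, ← h3]),
            List.map_cons]
          simp [← h3]
        · rw [if_neg h3, if_neg h3,
            List.filter_cons_of_neg (by simp [h2]; exact fun h => h3 h)]
      · rw [show stepP (b, r) kv = (b, r) by simp [stepP, h1, h2], ih, hMx, if_neg h1,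
          List.filter_cons_of_neg (by have := le_Mx ps b; simp; omega)]

-- ---- B side: the fold skips seen words; the words actually processed are ofList ----

def newWords (seen : PySem.Set String) : List String → List String
  | [] => []
  | w :: l => if PySem.Set.contains seen w then newWords seen l
              else w :: newWords (PySem.Set.add seen w) l

lemma newWords_cons_mem {seen : PySem.Set String} {w : String} (l : List String)
    (hc : PySem.Set.contains seen w = true) :
    newWords seen (w :: l) = newWords seen l := by
  simp only [newWords]; rw [if_pos hc]

lemma newWords_cons_new {seen : PySem.Set String} {w : String} (l : List String)
    (hc : ¬ PySem.Set.contains seen w = true) :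
    newWords seen (w :: l) = w :: newWords (PySem.Set.add seen w) l := by
  simp only [newWords]; rw [if_neg hc]

lemma newWords_spec (l : List String) (seen : PySem.Set String) :
    seen ++ newWords seen l = PySem.Set.update seen l := by
  induction l generalizing seen with
  | nil => simp [newWords, PySem.Set.update_nil]
  | cons w l ih =>
    rw [PySem.Set.update_cons]
    by_cases h : w ∈ seen
    · rw [newWords_cons_mem l ((PySem.Set.contains_iff _ _).mpr h), PySem.Set.add_of_mem h]
      exact ih seen
    · have hc : ¬ PySem.Set.contains seen w = true := fun hh => h ((PySem.Set.contains_iff _ _).mp hh)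
      rw [newWords_cons_new l hc, ← ih (PySem.Set.add seen w), PySem.Set.add_of_not_mem h]
      simp

lemma stepB_mem {st : PySem.Set String × Int × List String} {w : String}
    (hc : PySem.Set.contains st.1 w = true) : stepB st w = st := by
  simp only [stepB]; rw [if_pos hc]

lemma stepB_new {st : PySem.Set String × Int × List String} {w : String}
    (hc : ¬ PySem.Set.contains st.1 w = true) :
    stepB st w = (PySem.Set.add st.1 w, stepP st.2 (w, scoreB w)) := by
  simp only [stepB, stepP]; rw [if_neg hc]

lemma B_unroll (l : List String) (seen : PySem.Set String) (b : Int) (r : List String) :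
    l.foldl stepB (seen, (b, r))
      = (PySem.Set.update seen l,
         (newWords seen l).foldl (fun br w => stepP br (w, scoreB w)) (b, r)) := by
  induction l generalizing seen b r with
  | nil => simp [newWords, PySem.Set.update_nil]
  | cons w l ih =>
    rw [PySem.Set.update_cons]
    by_cases hc : PySem.Set.contains seen w = true
    · rw [List.foldl_cons, stepB_mem hc, newWords_cons_mem l hc,
        PySem.Set.add_of_mem ((PySem.Set.contains_iff _ _).mp hc)]
      exact ih seen b r
    · rw [List.foldl_cons, stepB_new hc, newWords_cons_new l hc, List.foldl_cons]
      exact ih (PySem.Set.add seen w) (stepP (b, r) (w, scoreB w)).1 (stepP (b, r) (w, scoreB w)).2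

-- ===== VERDICT (by name: the statement is the Claim_ definition above) =====
theorem worthOfList_spec : Claim_equal_worthOfList := by
  intro list _
  unfold Spec_worthOfList
  show worthOfList list = _
  simp only [worthOfList, worthOfList_alt, items_A, B_unroll]
  have hnew : newWords PySem.Set.empty list = PySem.Set.ofList list := by
    have := newWords_spec list PySem.Set.empty
    simpa [PySem.Set.empty, PySem.Set.update_nil_left] using this
  rw [hnew]
  rw [show (fun (br : Int × List String) w => stepP br (w, scoreB w))
        = fun br w => stepP br ((fun w => (w, scoreB w)) w) from rfl,
    ← List.foldl_map (f := fun w => (w, scoreB w)) (g := stepP)]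
  have hmap : (PySem.Set.ofList list).map (fun w => (w, scoreB w))
      = (PySem.Set.ofList list).map (fun w => (w, calculate_score w)) := by
    refine List.map_congr_left ?_; intro w _; rw [score_eq]
  rw [hmap, onepass]
  rw [PySem.List.foldl_append_ite (fun kv => kv.2 = _) Prod.fst _ []]
  simp [Mx]
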